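-- pv_equiv track=rewrite | github.com/raeez/chiral-bar-cobar | compute/lib/modular_forms_shadow_engine.py | qm_dimension
-- ===== SOURCE A (Python) =====
-- from typing import Any, Dict, List, Optional, Tuple
--
-- def qm_dimension(weight: int, max_depth: Optional[int] = None) -> int:
--     r"""Dimension of the space of quasi-modular forms of given weight.
--
--     QM_k(SL(2,Z)) = C[E_2*, E_4, E_6] graded by weight.
--     dim QM_k = sum_{p=0}^{floor(k/2)} dim M_{k-2p}(SL(2,Z))
--
--     where M_j is the space of holomorphic modular forms of weight j.
--
--     dim M_k(SL(2,Z)):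
--         k < 0 or k odd: 0
--         k = 0: 1
--         k = 2: 0  (no holomorphic modular forms of weight 2)
--         k >= 4 even: floor(k/12) + 1 if k mod 12 != 2, else floor(k/12)
--
--     If max_depth is specified, restrict to depth <= max_depth:
--         dim QM_k^{<=p} = sum_{j=0}^{min(p, floor(k/2))} dim M_{k-2j}
--     """
--     if weight < 0 or weight % 2 != 0:
--         return 0
--
--     def dim_M(k):
--         """Dimension of M_k(SL(2,Z))."""
--         if k < 0 or k % 2 != 0:
--             return 0
--         if k == 0:
--             return 1
--         if k == 2:
--             return 0
--         r = k % 12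
--         d = k // 12
--         if r == 2:
--             return d
--         return d + 1
--
--     max_p = weight // 2
--     if max_depth is not None:
--         max_p = min(max_p, max_depth)
--
--     total = 0
--     for p in range(max_p + 1):
--         j = weight - 2 * p
--         if j >= 0:
--             total += dim_M(j)
--     return total
-- ===== SOURCE B (Python) =====
-- from typing import Optional
--
-- def qm_dimension(weight: int, max_depth: Optional[int] = None) -> int:
--     """Closed-form O(1) evaluation of dim QM_k via arithmetic-series summation.
--
--     Writing j = 2m, dim M_{2m} = m//6 + (1 if m % 6 != 1 else 0) for all m >= 0,
--     so the sum over p telescopes to a floor-division series plus a residue count.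
--     """
--     if weight < 0 or weight % 2 != 0:
--         return 0
--     b = weight // 2
--     max_p = b if max_depth is None else min(b, max_depth)
--     if max_p < 0:
--         return 0
--     a = b - max_p  # sum over m = a..b of (m//6 + [m % 6 != 1])
--
--     def G(n):  # sum_{m=0}^{n-1} m//6
--         q, r = divmod(n, 6)
--         return 3 * q * (q - 1) + r * q
--
--     ones = (b - a + 1) - ((b + 5) // 6 - (a + 4) // 6)
--     return G(b + 1) - G(a) + ones
-- ===== Notes on version B (the rewrite author's own statement) =====
-- stated objective: faster
-- what changed: Replaces A's O(weight) loop summing dim_M over all depths with a closed-form formula: the sum telescopes into an arithmetic series of floor-divisions (G) plus a residue-class count, evaluated in O(1).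
import Mathlib
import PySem

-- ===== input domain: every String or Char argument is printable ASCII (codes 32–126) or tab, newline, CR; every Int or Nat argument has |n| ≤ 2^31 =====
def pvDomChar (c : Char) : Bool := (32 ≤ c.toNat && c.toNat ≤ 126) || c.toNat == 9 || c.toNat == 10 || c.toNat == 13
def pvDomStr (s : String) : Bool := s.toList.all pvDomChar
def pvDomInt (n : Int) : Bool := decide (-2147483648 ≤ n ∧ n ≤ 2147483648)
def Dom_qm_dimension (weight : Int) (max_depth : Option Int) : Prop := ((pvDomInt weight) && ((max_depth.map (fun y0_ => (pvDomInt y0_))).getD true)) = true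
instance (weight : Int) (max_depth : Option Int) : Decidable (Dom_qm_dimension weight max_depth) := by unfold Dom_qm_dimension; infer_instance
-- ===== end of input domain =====

-- B replaces A's O(weight) loop over depths by a closed-form arithmetic-series/residue-count formula (O(1)); equivalence is proved on all inputs.

-- ===== PORT A =====
-- inner helper dim_M of A, transliterated
def pvDimM (k : Int) : Int :=
  if k < 0 ∨ PySem.Int.mod k 2 ≠ 0 then 0
  else if k = 0 then 1
  else if k = 2 then 0
  else
    let r := PySem.Int.mod k 12
    let d := PySem.Int.floordiv k 12
    if r = 2 then d else d + 1

def qm_dimension (weight : Int) (max_depth : Option Int) : Int :=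
  if weight < 0 ∨ PySem.Int.mod weight 2 ≠ 0 then 0
  else
    let max_p :=
      match max_depth with
      | none => PySem.Int.floordiv weight 2
      | some d => min (PySem.Int.floordiv weight 2) d
    (PySem.List.pyRange 0 (max_p + 1) 1).foldl
      (fun total p =>
        let j := weight - 2 * p
        if j ≥ 0 then total + pvDimM j else total) 0

-- ===== PORT B =====
-- helper G of B: sum_{m=0}^{n-1} m//6 in closed form
def pvG (n : Int) : Int :=
  let q := PySem.Int.floordiv n 6
  let r := PySem.Int.mod n 6
  3 * q * (q - 1) + r * q

def qm_dimension_alt (weight : Int) (max_depth : Option Int) : Int :=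
  if weight < 0 ∨ PySem.Int.mod weight 2 ≠ 0 then 0
  else
    let b := PySem.Int.floordiv weight 2
    let max_p := match max_depth with | none => b | some d => min b d
    if max_p < 0 then 0
    else
      let a := b - max_p
      let ones := (b - a + 1) -
        (PySem.Int.floordiv (b + 5) 6 - PySem.Int.floordiv (a + 4) 6)
      pvG (b + 1) - pvG a + ones

-- ===== PRECONDITION & SPEC =====
def Spec_qm_dimension (weight : Int) (max_depth : Option Int) (out : Int) : Prop := out = qm_dimension_alt weight max_depth
instance (weight : Int) (max_depth : Option Int) (out : Int) : Decidable (Spec_qm_dimension weight max_depth out) := by unfold Spec_qm_dimension; infer_instance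

-- ===== CLAIM (what is proved, stated in full; the proofs are below) =====
def Claim_equal_qm_dimension : Prop := ∀ (weight : Int) (max_depth : Option Int), Dom_qm_dimension weight max_depth → Spec_qm_dimension weight max_depth (qm_dimension weight max_depth)

-- ===== LEMMAS AND PROOFS =====

-- pvG in terms of Lean's ediv (divisor 6 > 0, so Python floor division = ediv)
lemma pvG_eq (n : Int) : pvG n = 3 * (n / 6) * (n / 6 - 1) + (n % 6) * (n / 6) := by
  simp [pvG]

-- telescoping step of G: G(n+1) = G(n) + n // 6
lemma pvG_step (n : Int) : pvG (n + 1) = pvG n + n / 6 := by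
  rw [pvG_eq, pvG_eq]
  have h0 : 0 ≤ n % 6 := Int.emod_nonneg n (by norm_num)
  have h6 : n % 6 < 6 := Int.emod_lt_of_pos n (by norm_num)
  by_cases h : n % 6 = 5
  · have hq : (n + 1) / 6 = n / 6 + 1 := by omega
    have hr : (n + 1) % 6 = 0 := by omega
    rw [hq, hr, h]; ring
  · have hq : (n + 1) / 6 = n / 6 := by omega
    have hr : (n + 1) % 6 = n % 6 + 1 := by omega
    rw [hq, hr]; ring

-- dim_M(2m) in the summand form B uses, for m ≥ 0
lemma pvDimM_closed (m : Int) (hm : 0 ≤ m) :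
    pvDimM (2 * m) = m / 6 + (if m % 6 = 1 then 0 else 1) := by
  simp only [pvDimM]
  rw [PySem.Int.mod_eq_emod_of_pos (a := 2 * m) (b := 2) (by norm_num),
      PySem.Int.mod_eq_emod_of_pos (a := 2 * m) (b := 12) (by norm_num),
      PySem.Int.floordiv_eq_ediv_of_pos (a := 2 * m) (b := 12) (by norm_num)]
  split_ifs <;> omega

-- the residue-count term, for a ≥ 0: (b-a+1) - (#ones) telescopes with step [a%6 ≠ 1]
lemma count_step (a : Int) :
    (a + 5) / 6 - (a + 4) / 6 = (if a % 6 = 1 then 1 else 0) := by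
  split_ifs with h <;> omega

-- B's closed form as a function of (b, a)
def pvF (b a : Int) : Int :=
  pvG (b + 1) - pvG a + ((b - a + 1) - ((b + 5) / 6 - (a + 4) / 6))

-- A's loop computes pvF: induction on the number of summed depths
lemma loop_eq (b : Int) (hb : 0 ≤ b) :
    ∀ (n : Nat), (n : Int) ≤ b →
      (PySem.List.pyRange 0 ((n : Int) + 1) 1).foldl
        (fun total p =>
          if 2 * b - 2 * p ≥ 0 then total + pvDimM (2 * b - 2 * p) else total) 0
        = pvF b (b - n) := by
  intro n
  induction n with
  | zero =>
    intro _
    simp only [Nat.cast_zero]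
    rw [PySem.List.pyRange_one_singleton]
    simp only [List.foldl]
    have h1 : 2 * b - 2 * 0 = 2 * b := by ring
    rw [h1, if_pos (by omega), pvDimM_closed b hb]
    simp only [pvF, Int.sub_zero, Int.zero_add]
    rw [pvG_step b]
    have := count_step b
    split_ifs at this ⊢ <;> linarith
  | succ k ih =>
    intro hk
    have hk' : (k : Int) ≤ b := by push_cast at hk ⊢; omega
    have hcast : ((k + 1 : Nat) : Int) = (k : Int) + 1 := by push_cast; ring
    rw [hcast, PySem.List.pyRange_one_succ_right (by positivity), List.foldl_append,
        ih hk']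
    simp only [List.foldl]
    have hj : 2 * b - 2 * ((k : Int) + 1) = 2 * (b - ((k : Int) + 1)) := by ring
    have hbk : (0 : Int) ≤ b - ((k : Int) + 1) := by omega
    rw [hj, if_pos (by omega), pvDimM_closed _ hbk]
    simp only [pvF]
    have hG : pvG (b - (k : Int)) = pvG (b - ((k : Int) + 1)) + (b - ((k : Int) + 1)) / 6 := by
      have h2 := pvG_step (b - ((k : Int) + 1))
      have h3 : b - ((k : Int) + 1) + 1 = b - (k : Int) := by ring
      rw [h3] at h2; exact h2
    have hC := count_step (b - ((k : Int) + 1))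
    have h4 : b - ((k : Int) + 1) + 5 = b - (k : Int) + 4 := by ring
    rw [h4] at hC
    rw [hG]
    split_ifs at hC ⊢ <;> linarith

-- A's whole post-guard computation equals B's, for any depth bound max_p ≤ weight // 2
lemma main_helper (weight max_p : Int) (hw : 0 ≤ weight)
    (hmod : PySem.Int.mod weight 2 = 0)
    (hmple : max_p ≤ PySem.Int.floordiv weight 2) :
    (PySem.List.pyRange 0 (max_p + 1) 1).foldl
      (fun total p =>
        if weight - 2 * p ≥ 0 then total + pvDimM (weight - 2 * p) else total) 0
    = (if max_p < 0 then 0 else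
        pvG (PySem.Int.floordiv weight 2 + 1) - pvG (PySem.Int.floordiv weight 2 - max_p) +
          (PySem.Int.floordiv weight 2 - (PySem.Int.floordiv weight 2 - max_p) + 1 -
            (PySem.Int.floordiv (PySem.Int.floordiv weight 2 + 5) 6 -
              PySem.Int.floordiv (PySem.Int.floordiv weight 2 - max_p + 4) 6))) := by
  rw [PySem.Int.mod_eq_emod_of_pos (a := weight) (b := 2) (by norm_num)] at hmod
  rw [PySem.Int.floordiv_eq_ediv_of_pos (a := weight) (b := 2) (by norm_num)] at hmple ⊢
  set b := weight / 2 with hbdef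
  have hb : 0 ≤ b := by positivity
  have hweq : weight = 2 * b := by omega
  by_cases hneg2 : max_p < 0
  · rw [if_pos hneg2, PySem.List.pyRange_one_eq_nil (by omega)]
    rfl
  · rw [if_neg hneg2]
    push Not at hneg2
    have hn : ((max_p.toNat : Nat) : Int) = max_p := Int.toNat_of_nonneg hneg2
    have hloop := loop_eq b hb max_p.toNat (by omega)
    rw [hn] at hloop
    simp only [pvF] at hloop
    rw [hweq] at *
    rw [hloop,
        PySem.Int.floordiv_eq_ediv_of_pos (a := b + 5) (b := 6) (by norm_num),
        PySem.Int.floordiv_eq_ediv_of_pos (a := b - max_p + 4) (b := 6) (by norm_num)]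

-- ===== VERDICT (by name: the statement is the Claim_ definition above) =====
theorem qm_dimension_spec : Claim_equal_qm_dimension := by
  intro weight max_depth _
  unfold Spec_qm_dimension
  simp only [qm_dimension, qm_dimension_alt]
  by_cases hneg : weight < 0 ∨ PySem.Int.mod weight 2 ≠ 0
  · rw [if_pos hneg, if_pos hneg]
  · rw [if_neg hneg, if_neg hneg]
    push Not at hneg
    obtain ⟨hw, hmod⟩ := hneg
    cases max_depth with
    | none => rw [main_helper weight _ hw hmod le_rfl]
    | some d => rw [main_helper weight _ hw hmod (min_le_left _ _)]
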